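-- pv_equiv track=rewrite | github.com/p4lm4d3v/leetcode-solutions | problems/205-isomorphic-strings/python/205_isomorphic_strings.py | toNumeric
-- ===== SOURCE A (Python) =====
-- from typing import Dict
--
-- def toNumeric(s: str) -> str:
--     dict: Dict[chr, int] = {}
--     n: int = 1
--     numeric: s = ""
--     for c in s:
--         if c in dict.keys():
--             numeric += str(dict[c])
--         else:
--             dict[c] = n
--             numeric += str(n)
--             n += 1
--     return numeric
-- ===== SOURCE B (Python) =====
-- def toNumeric(s: str) -> str:
--     # rank of c = number of distinct characters in the prefix of s ending at
--     # c's first occurrence; computed per character from the string itself,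
--     # with no mapping table or counter.
--     return ''.join(str(len(set(s[:s.index(c) + 1]))) for c in s)
-- ===== Notes on version B (the rewrite author's own statement) =====
-- stated objective: alternative
-- what changed: B drops A's incrementally-maintained dict and counter entirely: each character's rank is recomputed directly from the string as the number of distinct characters in the prefix ending at that character's first occurrence (s.index + slice + set + len), then joined.
import Mathlib
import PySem

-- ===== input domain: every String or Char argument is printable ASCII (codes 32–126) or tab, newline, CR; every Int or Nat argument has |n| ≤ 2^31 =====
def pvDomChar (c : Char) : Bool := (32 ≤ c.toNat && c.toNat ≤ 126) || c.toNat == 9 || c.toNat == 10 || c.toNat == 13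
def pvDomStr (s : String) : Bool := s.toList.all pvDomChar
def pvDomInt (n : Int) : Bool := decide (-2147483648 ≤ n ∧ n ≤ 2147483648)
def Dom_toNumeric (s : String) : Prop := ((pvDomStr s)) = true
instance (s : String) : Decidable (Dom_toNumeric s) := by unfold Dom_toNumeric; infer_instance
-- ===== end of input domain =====

-- B drops A's dict+counter state machine: each rank is recomputed from the string itself
-- (distinct-character count of the prefix up to the char's first occurrence); not faster, alternative.

-- ===== PORT A =====
-- A's loop: state is (dict, counter n, accumulated output); one step per character.
def toNumericAux (cs : List Char) (d : PySem.Dict Char Int) (n : Int) (acc : List Char) : List Char :=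
  match cs with
  | [] => acc
  | c :: rest =>
    if d.contains c then
      toNumericAux rest d n (acc ++ PySem.Int.toChars (d.getD c 0))
    else
      toNumericAux rest (d.insert c n) (n + 1) (acc ++ PySem.Int.toChars n)

def toNumeric (s : String) : String :=
  String.ofList (toNumericAux s.toList PySem.Dict.empty 1 [])

-- ===== PORT B =====
-- str(len(set(s[:s.index(c) + 1]))): first occurrence index, slice, set, len.
-- s.index(c) cannot raise here (c is drawn from s); the none branch is unreachable.
def rankOf (L : List Char) (c : Char) : Int :=
  match PySem.List.index? L c with
  | some i => ((PySem.Set.ofList (PySem.List.slice L none (some ((i : Int) + 1)))).length : Int)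
  | none => 0

-- ''.join(str(rank) for c in s): joining on "" is concatenation.
def toNumeric_alt (s : String) : String :=
  String.ofList ((s.toList.map (fun c => PySem.Int.toChars (rankOf s.toList c))).flatten)

-- ===== PRECONDITION & SPEC =====
def Spec_toNumeric (s : String) (out : String) : Prop := out = toNumeric_alt s
instance (s : String) (out : String) : Decidable (Spec_toNumeric s out) := by unfold Spec_toNumeric; infer_instance

-- ===== CLAIM (what is proved, stated in full; the proofs are below) =====
def Claim_equal_toNumeric : Prop := ∀ (s : String), Dom_toNumeric s → Spec_toNumeric s (toNumeric s)

-- ===== LEMMAS AND PROOFS =====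

-- set(p ++ [c]) has |set(p)| (+1 if c is new) elements.
theorem length_ofList_append_singleton (p : List Char) (c : Char) :
    (PySem.Set.ofList (p ++ [c])).length
      = if c ∈ p then (PySem.Set.ofList p).length else (PySem.Set.ofList p).length + 1 := by
  have h : PySem.Set.ofList (p ++ [c]) = PySem.Set.add (PySem.Set.ofList p) c := by
    simp [PySem.Set.ofList_eq_foldl, List.foldl_append]
  by_cases hc : c ∈ p
  · simp [h, PySem.Set.add, PySem.Set.mem_ofList, hc]
  · simp [h, PySem.Set.add, PySem.Set.mem_ofList, hc]

-- rank of c in p ++ c :: t when c is unseen: the prefix is p ++ [c], so |set(p)| + 1.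
theorem rankOf_fresh (p t : List Char) (c : Char) (hc : c ∉ p) :
    rankOf (p ++ c :: t) c = ((PySem.Set.ofList p).length : Int) + 1 := by
  have hidx : PySem.List.index? (p ++ c :: t) c = some p.length :=
    (PySem.List.index?_eq_some_iff _ _ _).mpr ⟨p, t, rfl, rfl, hc⟩
  have hsl : PySem.List.slice (p ++ c :: t) none (some ((p.length : Int) + 1))
      = p ++ [c] := by
    have : ((p.length : Int) + 1) = ((p.length + 1 : Nat) : Int) := by push_cast; ring
    rw [this, PySem.List.slice_to_natCast]
    have := List.take_length_add_append (l₁ := p) (l₂ := c :: t) 1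
    simpa using this
  unfold rankOf
  rw [hidx]
  simp only [hsl, length_ofList_append_singleton, if_neg hc]
  push_cast; ring

-- Main invariant: A's loop from state (d, |set(p)|+1, acc) over the rest of L = p ++ rest
-- emits exactly B's per-character ranks.
theorem loop_eq (L : List Char) (rest : List Char) : ∀ (p : List Char) (d : PySem.Dict Char Int) (acc : List Char),
    L = p ++ rest →
    (∀ c, d.contains c = decide (c ∈ p)) →
    (∀ c, c ∈ p → d.getD c 0 = rankOf L c) →
    toNumericAux rest d (((PySem.Set.ofList p).length : Int) + 1) acc
      = acc ++ (rest.map (fun c => PySem.Int.toChars (rankOf L c))).flatten := by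
  induction rest with
  | nil => intro p d acc _ _ _; simp [toNumericAux]
  | cons c rest ih =>
    intro p d acc hL hcont hgetD
    have hmem : ∀ c', (c' ∈ p ++ [c]) ↔ (c' ∈ p ∨ c' = c) := by
      intro c'; simp
    by_cases hc : c ∈ p
    · -- seen before: dict lookup, state unchanged
      have hlen : (PySem.Set.ofList (p ++ [c])).length = (PySem.Set.ofList p).length := by
        rw [length_ofList_append_singleton, if_pos hc]
      have h := ih (p ++ [c]) d (acc ++ PySem.Int.toChars (d.getD c 0))
        (by rw [hL]; simp)
        (by intro c'
            rw [hcont c']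
            by_cases h' : c' = c
            · subst h'; simp [hc]
            · simp [h'])
        (by intro c' hc'
            rcases (hmem c').mp hc' with h' | h'
            · exact hgetD c' h'
            · subst h'; exact hgetD c' hc)
      rw [toNumericAux, if_pos (by rw [hcont c]; simp [hc]), ← hlen, h,
          hgetD c hc]
      simp [List.map_cons]
    · -- fresh: insert, counter bumps
      have hrank : rankOf L c = ((PySem.Set.ofList p).length : Int) + 1 := by
        rw [hL]; exact rankOf_fresh p rest c hc
      have hlen : (PySem.Set.ofList (p ++ [c])).length = (PySem.Set.ofList p).length + 1 := by
        rw [length_ofList_append_singleton, if_neg hc]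
      have h := ih (p ++ [c]) (d.insert c (((PySem.Set.ofList p).length : Int) + 1))
        (acc ++ PySem.Int.toChars (((PySem.Set.ofList p).length : Int) + 1))
        (by rw [hL]; simp)
        (by intro c'
            rw [PySem.Dict.contains_insert, hcont c']
            by_cases h' : c' = c
            · subst h'; simp
            · simp [h'])
        (by intro c' hc'
            by_cases h' : c' = c
            · subst h'
              rw [PySem.Dict.getD_insert_self, hrank]
            · rcases (hmem c').mp hc' with h'' | h''
              · rw [PySem.Dict.getD_insert, if_neg h']
                exact hgetD c' h''
              · exact absurd h'' h')
      rw [toNumericAux, if_neg (by rw [hcont c]; simp [hc])]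
      rw [show ((PySem.Set.ofList (p ++ [c])).length : Int) + 1
            = (((PySem.Set.ofList p).length : Int) + 1) + 1 by rw [hlen]; push_cast; ring] at h
      rw [h, ← hrank]
      simp [List.map_cons]

-- ===== VERDICT (by name: the statement is the Claim_ definition above) =====
theorem toNumeric_spec : Claim_equal_toNumeric := by
  intro s _
  show toNumeric s = toNumeric_alt s
  unfold toNumeric toNumeric_alt
  have h := loop_eq s.toList s.toList [] PySem.Dict.empty [] rfl
    (by intro c; rfl) (by intro c hc; cases hc)
  have h' : toNumericAux s.toList PySem.Dict.empty 1 []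
      = (s.toList.map (fun c => PySem.Int.toChars (rankOf s.toList c))).flatten := by
    simpa [PySem.Set.ofList, PySem.Set.empty] using h
  rw [h']
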